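-- pv_equiv track=rewrite | github.com/narasimha-gaonkar/Leetcode | 0720-longest-word-in-dictionary/0720-longest-word-in-dictionary.py | longestWord
-- ===== SOURCE A (Python) =====
-- from typing import List
--
-- def longestWord(words: List[str]) -> str:
--
--     words.sort(key=lambda s: len(s))
--
--     res = {}
--
--     compare = set()
--     compare.add('')
--
--     max_len_word = ''
--
--     max_len = 0
--
--     for word in words:
--         if word[:-1] in compare:
--             if len(word) > max_len:
--                 max_len_word = word
--                 max_len = len(word)
--             elif len(word) == max_len and word < max_len_word:
--                 max_len_word = word
--                 max_len = len(word)
--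
--             compare.add(word)
--     return max_len_word
--     if not res:
--         return ''
--     res = list(filter(lambda x: x[1] == max_len, res.items()))
--
--     if len(res) == 1:
--         return res[0][0]
--
--     return sorted(res)[0][0]
-- ===== SOURCE B (Python) =====
-- from typing import List
--
-- def longestWord(words: List[str]) -> str:
--     words.sort(key=len)          # keep A's observable in-place sort side effect
--     present = set(words)
--     best = ''
--     for w in words:
--         if all(w[:k] in present for k in range(1, len(w))):
--             if len(w) > len(best):
--                 best = w
--             elif len(w) == len(best) and w < best:
--                 best = w
--     return best
-- ===== Notes on version B (the rewrite author's own statement) =====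
-- stated objective: alternative
-- what changed: A incrementally grows a set of already-buildable words while scanning the length-sorted list and tests only word[:-1] against it; B instead checks every proper prefix of each word directly against the static set of all words, so the result no longer depends on the incremental state (B keeps the in-place length sort only for its observable side effect on the argument).
import Mathlib
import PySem

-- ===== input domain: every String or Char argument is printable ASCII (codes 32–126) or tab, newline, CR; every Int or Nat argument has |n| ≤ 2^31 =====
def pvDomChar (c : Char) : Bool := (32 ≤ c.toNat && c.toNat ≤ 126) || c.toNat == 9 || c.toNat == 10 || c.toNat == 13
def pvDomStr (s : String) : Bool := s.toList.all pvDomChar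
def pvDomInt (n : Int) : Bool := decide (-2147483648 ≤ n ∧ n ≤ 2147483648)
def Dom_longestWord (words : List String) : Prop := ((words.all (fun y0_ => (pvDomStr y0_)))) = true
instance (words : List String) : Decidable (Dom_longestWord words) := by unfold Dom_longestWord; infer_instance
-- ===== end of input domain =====

-- B replaces A's incremental "buildable set" (which relies on length-sorted processing order)
-- by a direct check of every proper prefix against the static set of all words (alternative
-- algorithm, same cost); B keeps A's observable in-place length-sort of `words`; the
-- equivalence proved here is about the return value.


-- ===== PORT A =====
-- one iteration of A's `for word in words` loop; state = (compare, max_len_word, max_len)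
def stepA (st : PySem.Set String × String × Int) (word : String) : PySem.Set String × String × Int :=
  if st.1.contains (PySem.Str.slice word none (some (-1))) then
    let p : String × Int :=
      if PySem.Str.len word > st.2.2 then (word, PySem.Str.len word)
      else if PySem.Str.len word == st.2.2 && decide (word < st.2.1) then (word, PySem.Str.len word)
      else (st.2.1, st.2.2)
    (st.1.add word, p.1, p.2)
  else st

def longestWord (words : List String) : String :=
  let ws := PySem.List.sorted words (fun s => PySem.Str.len s)
  let st := ws.foldl stepA (PySem.Set.add PySem.Set.empty "", "", 0)
  st.2.1

-- ===== PORT B =====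
-- `all(w[:k] in present for k in range(1, len(w)))`
def buildableB (present : PySem.Set String) (w : String) : Bool :=
  (PySem.List.pyRange 1 (PySem.Str.len w) 1).all
    (fun k => present.contains (PySem.Str.slice w none (some k)))

-- one iteration of B's loop; state = best
def stepB (present : PySem.Set String) (best w : String) : String :=
  if buildableB present w then
    if PySem.Str.len w > PySem.Str.len best then w
    else if PySem.Str.len w == PySem.Str.len best && decide (w < best) then w
    else best
  else best

def longestWord_alt (words : List String) : String :=
  let ws := PySem.List.sorted words (fun s => PySem.Str.len s)
  let present := PySem.Set.ofList ws
  ws.foldl (stepB present) ""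

-- ===== PRECONDITION & SPEC =====
def Spec_longestWord (words : List String) (out : String) : Prop := out = longestWord_alt words
instance (words : List String) (out : String) : Decidable (Spec_longestWord words out) := by unfold Spec_longestWord; infer_instance

-- ===== CLAIM (what is proved, stated in full; the proofs are below) =====
def Claim_equal_longestWord : Prop := ∀ (words : List String), Dom_longestWord words → Spec_longestWord words (longestWord words)

-- ===== LEMMAS AND PROOFS =====

-- a word is "good" (buildable) wrt the word list S: every nonempty proper prefix is in S
def Good (S : List String) (w : String) : Prop :=
  ∀ k : Nat, 1 ≤ k → k < w.toList.length → String.ofList (w.toList.take k) ∈ S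

lemma str_slice_take (w : String) (k : Int) (hk : 0 ≤ k) :
    PySem.Str.slice w none (some k) = String.ofList (w.toList.take k.toNat) := by
  apply String.toList_inj.mp
  rw [PySem.Str.toList_slice, PySem.Chars.slice_eq_listSlice, PySem.List.slice_to _ hk,
    String.toList_ofList]

lemma str_slice_neg_one (w : String) :
    PySem.Str.slice w none (some (-1)) = String.ofList w.toList.dropLast := by
  apply String.toList_inj.mp
  rw [PySem.Str.slice_to_neg_one, String.toList_ofList]

lemma buildableB_iff (S : List String) (w : String) :
    buildableB (PySem.Set.ofList S) w = true ↔ Good S w := by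
  unfold buildableB
  rw [List.all_eq_true]
  constructor
  · intro h k hk1 hk2
    have hmem : (k : Int) ∈ PySem.List.pyRange 1 (PySem.Str.len w) 1 := by
      rw [PySem.List.mem_pyRange_one, PySem.Str.len_eq]
      omega
    have := h _ hmem
    rw [str_slice_take w k (by omega), PySem.Set.contains_iff, PySem.Set.mem_ofList] at this
    simpa using this
  · intro hg x hx
    rw [PySem.List.mem_pyRange_one, PySem.Str.len_eq] at hx
    rw [str_slice_take w x (by omega), PySem.Set.contains_iff, PySem.Set.mem_ofList]
    have := hg x.toNat (by omega) (by omega)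
    simpa [Int.toNat_of_nonneg (by omega : (0:Int) ≤ x)] using this

-- A's condition `word[:-1] in compare` agrees with Good, given the loop invariant on compare
lemma condA_iff (S done rest : List String) (w : String)
    (hS : S = done ++ w :: rest)
    (hs : S.Pairwise (fun a b => a.toList.length ≤ b.toList.length))
    (comp : PySem.Set String)
    (hc : ∀ v : String, v ∈ comp ↔ v = "" ∨ (v ∈ done ∧ Good S v)) :
    (comp.contains (PySem.Str.slice w none (some (-1))) = true) ↔ Good S w := by
  rw [str_slice_neg_one, PySem.Set.contains_iff, hc]
  -- every element of S strictly shorter than w is already in done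
  have hclose : ∀ u ∈ S, u.toList.length < w.toList.length → u ∈ done := by
    intro u hu hlen
    rw [hS] at hu hs
    rcases List.mem_append.mp hu with h | h
    · exact h
    · rcases List.mem_cons.mp h with rfl | h
      · omega
      · have := ((List.pairwise_append.mp hs).2.1)
        have hw := (List.pairwise_cons.mp this).1 u h
        omega
  by_cases h1 : w.toList.length ≤ 1
  · -- w[:-1] = '' ∈ compare; Good is vacuous
    have hd : w.toList.dropLast = [] := by
      exact List.eq_nil_of_length_eq_zero (by rw [List.length_dropLast]; omega)
    rw [hd]
    constructor
    · intro _ k hk1 hk2; omega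
    · intro _; left; rfl
  · rw [not_le] at h1
    have hne : String.ofList w.toList.dropLast ≠ "" := by
      intro h
      have h2 := congrArg (fun s => s.toList.length) h
      simp only [String.toList_ofList, String.toList_empty, List.length_dropLast,
        List.length_nil] at h2
      omega
    have hdl : w.toList.dropLast = w.toList.take (w.toList.length - 1) :=
      List.dropLast_eq_take
    constructor
    · rintro (h | ⟨hdone, hgood⟩)
      · exact absurd h hne
      · intro k hk1 hk2
        by_cases hk : k = w.toList.length - 1
        · subst hk
          rw [← hdl]
          exact (hS ▸ List.mem_append.mpr (Or.inl hdone))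
        · have hk' : k < w.toList.length - 1 := by omega
          have := hgood k hk1 (by rw [String.toList_ofList, List.length_dropLast]; omega)
          rw [String.toList_ofList, hdl, List.take_take,
            Nat.min_eq_left (by omega : k ≤ w.toList.length - 1)] at this
          exact this
    · intro hg
      right
      have hwS : String.ofList w.toList.dropLast ∈ S := by
        have := hg (w.toList.length - 1) (by omega) (by omega)
        rwa [← hdl] at this
      refine ⟨hclose _ hwS (by rw [String.toList_ofList, List.length_dropLast]; omega), ?_⟩
      intro k hk1 hk2
      rw [String.toList_ofList, List.length_dropLast] at hk2
      have := hg k hk1 (by omega)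
      rw [String.toList_ofList, hdl, List.take_take,
        Nat.min_eq_left (by omega : k ≤ w.toList.length - 1)]
      exact this

lemma fold_agree (S : List String)
    (hs : S.Pairwise (fun a b => a.toList.length ≤ b.toList.length)) :
    ∀ (rest done : List String), S = done ++ rest →
    ∀ (comp : PySem.Set String) (best : String),
    (∀ v : String, v ∈ comp ↔ v = "" ∨ (v ∈ done ∧ Good S v)) →
    (rest.foldl stepA (comp, best, (best.toList.length : Int))).2.1
      = rest.foldl (stepB (PySem.Set.ofList S)) best := by
  intro rest
  induction rest with
  | nil => intro done _ comp best _; rfl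
  | cons w rest ih =>
    intro done hS comp best hc
    have hcond := condA_iff S done rest w hS hs comp hc
    have hbuild := buildableB_iff S w
    have hS' : S = (done ++ [w]) ++ rest := by rw [hS]; simp
    by_cases hg : Good S w
    · -- both loops accept w
      have hA : comp.contains (PySem.Str.slice w none (some (-1))) = true := hcond.mpr hg
      have hB : buildableB (PySem.Set.ofList S) w = true := hbuild.mpr hg
      have hcomp' : ∀ v : String, v ∈ comp.add w ↔ v = "" ∨ (v ∈ done ++ [w] ∧ Good S v) := by
        intro v
        rw [PySem.Set.mem_add, hc]
        constructor
        · rintro ((rfl | ⟨hv, hgv⟩) | rfl)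
          · left; rfl
          · right; exact ⟨List.mem_append.mpr (Or.inl hv), hgv⟩
          · right; exact ⟨List.mem_append.mpr (Or.inr (List.mem_singleton.mpr rfl)), hg⟩
        · rintro (rfl | ⟨hv, hgv⟩)
          · left; left; rfl
          · rcases List.mem_append.mp hv with h | h
            · left; right; exact ⟨h, hgv⟩
            · right; exact (List.mem_singleton.mp h)
      have hstep : stepA (comp, best, (best.toList.length : Int)) w
            = (comp.add w, stepB (PySem.Set.ofList S) best w,
               (((stepB (PySem.Set.ofList S) best w).toList.length : Int))) := by
        simp only [stepA, stepB, hA, hB, if_true, PySem.Str.len_eq]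
        split_ifs <;> rfl
      simp only [List.foldl_cons]
      rw [hstep]
      exact ih (done ++ [w]) hS' (comp.add w) _ hcomp'
    · -- both loops skip w
      have hA : ¬ comp.contains (PySem.Str.slice w none (some (-1))) = true := fun h => hg (hcond.mp h)
      have hB : ¬ buildableB (PySem.Set.ofList S) w = true := fun h => hg (hbuild.mp h)
      have hcomp' : ∀ v : String, v ∈ comp ↔ v = "" ∨ (v ∈ done ++ [w] ∧ Good S v) := by
        intro v
        rw [hc]
        constructor
        · rintro (rfl | ⟨hv, hgv⟩)
          · left; rfl
          · right; exact ⟨List.mem_append.mpr (Or.inl hv), hgv⟩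
        · rintro (rfl | ⟨hv, hgv⟩)
          · left; rfl
          · rcases List.mem_append.mp hv with h | h
            · right; exact ⟨h, hgv⟩
            · exact absurd hgv (by rw [List.mem_singleton.mp h]; exact hg)
      have hA' : PySem.Str.slice w none (some (-1)) ∉ comp :=
        fun h => hA ((PySem.Set.contains_iff comp _).mpr h)
      have hB' := Bool.eq_false_iff.mpr hB
      simp only [List.foldl_cons]
      rw [show stepA (comp, best, (best.toList.length : Int)) w = (comp, best, (best.toList.length : Int)) from by simp [stepA, hA'],
          show stepB (PySem.Set.ofList S) best w = best from by simp [stepB, hB']]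
      exact ih (done ++ [w]) hS' comp best hcomp'

-- ===== VERDICT (by name: the statement is the Claim_ definition above) =====
theorem longestWord_spec : Claim_equal_longestWord := by
  intro words _
  unfold Spec_longestWord longestWord longestWord_alt
  set S := PySem.List.sorted words (fun s => PySem.Str.len s) with hSdef
  have hs : S.Pairwise (fun a b => a.toList.length ≤ b.toList.length) := by
    have := PySem.List.sorted_pairwise words (fun s => PySem.Str.len s)
    refine this.imp ?_
    intro a b h
    simp only [PySem.Str.len_eq] at h
    exact_mod_cast h
  have hinit : ∀ v : String, v ∈ PySem.Set.add PySem.Set.empty "" ↔ v = "" ∨ (v ∈ ([] : List String) ∧ Good S v) := by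
    intro v
    rw [PySem.Set.mem_add]
    simp [PySem.Set.empty]
  have h := fold_agree S hs S [] rfl (PySem.Set.add PySem.Set.empty "") "" hinit
  simpa using h
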